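-- pv_equiv track=rewrite | github.com/penghaokun520-gif/- | skin_recognizer.py | _find_separators
-- ===== SOURCE A (Python) =====
-- def _find_separators(dark_indices):
--     if len(dark_indices) == 0:
--         return []
--     segments, start = [], dark_indices[0]
--     for i in range(1, len(dark_indices)):
--         if dark_indices[i] - dark_indices[i-1] > 5:
--             segments.append((start, dark_indices[i-1]))
--             start = dark_indices[i]
--     segments.append((start, dark_indices[-1]))
--     return [s for s in segments if s[1] - s[0] >= 2]
-- ===== SOURCE B (Python) =====
-- def _find_separators(dark_indices):
--     if len(dark_indices) == 0:
--         return []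
--     n = len(dark_indices)
--     breaks = [i for i in range(1, n) if dark_indices[i] - dark_indices[i-1] > 5]
--     bounds = [0] + breaks + [n]
--     segments = [(dark_indices[lo], dark_indices[hi - 1])
--                 for lo, hi in zip(bounds, bounds[1:])]
--     return [s for s in segments if s[1] - s[0] >= 2]
-- ===== Notes on version B (the rewrite author's own statement) =====
-- stated objective: alternative
-- what changed: Replaced the single stateful loop carrying (segments, start) by a two-pass decomposition: first collect the break positions (gap > 5), then materialize each segment from the resulting boundary list via zip, then filter.
import Mathlib
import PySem

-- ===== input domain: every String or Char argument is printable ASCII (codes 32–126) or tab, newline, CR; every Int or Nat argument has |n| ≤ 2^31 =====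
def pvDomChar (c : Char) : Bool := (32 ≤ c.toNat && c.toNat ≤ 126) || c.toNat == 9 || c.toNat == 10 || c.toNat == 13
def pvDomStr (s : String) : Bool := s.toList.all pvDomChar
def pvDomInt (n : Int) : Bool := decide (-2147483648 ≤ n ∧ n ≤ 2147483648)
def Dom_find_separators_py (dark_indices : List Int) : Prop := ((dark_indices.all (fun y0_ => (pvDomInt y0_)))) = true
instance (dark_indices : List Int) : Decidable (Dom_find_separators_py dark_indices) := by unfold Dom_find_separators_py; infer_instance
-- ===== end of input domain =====

-- B replaces A's single stateful loop by a two-pass decomposition (break positions, then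
-- segments from the boundary list); same O(n) cost, objective: alternative decomposition.

-- shared indexing helper: dark_indices[i]; getD 0 is only taken for provably in-range i
def pyAt (d : List Int) (i : Int) : Int := (PySem.List.pyGet? d i).getD 0

-- ===== PORT A =====
def find_separators_py (dark_indices : List Int) : List (Int × Int) :=
  if dark_indices.length = 0 then []
  else
    let st := (PySem.List.pyRange 1 (dark_indices.length : Int) 1).foldl
      (fun (st : List (Int × Int) × Int) i =>
        if pyAt dark_indices i - pyAt dark_indices (i - 1) > 5 then
          (st.1 ++ [(st.2, pyAt dark_indices (i - 1))], pyAt dark_indices i)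
        else st)
      ([], pyAt dark_indices 0)
    let segments := st.1 ++ [(st.2, pyAt dark_indices (-1))]
    segments.filter (fun s => s.2 - s.1 ≥ 2)

-- ===== PORT B =====
def find_separators_py_alt (dark_indices : List Int) : List (Int × Int) :=
  if dark_indices.length = 0 then []
  else
    let n : Int := dark_indices.length
    let breaks := (PySem.List.pyRange 1 n 1).filter
      (fun i => pyAt dark_indices i - pyAt dark_indices (i - 1) > 5)
    let bounds : List Int := 0 :: (breaks ++ [n])
    let segments := (bounds.zip bounds.tail).map
      (fun lohi => (pyAt dark_indices lohi.1, pyAt dark_indices (lohi.2 - 1)))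
    segments.filter (fun s => s.2 - s.1 ≥ 2)

-- ===== PRECONDITION & SPEC =====
def Spec_find_separators_py (dark_indices : List Int) (out : List (Int × Int)) : Prop := out = find_separators_py_alt dark_indices
instance (dark_indices : List Int) (out : List (Int × Int)) : Decidable (Spec_find_separators_py dark_indices out) := by unfold Spec_find_separators_py; infer_instance

-- ===== CLAIM (what is proved, stated in full; the proofs are below) =====
def Claim_equal_find_separators_py : Prop := ∀ (dark_indices : List Int), Dom_find_separators_py dark_indices → Spec_find_separators_py dark_indices (find_separators_py dark_indices)

-- ===== LEMMAS AND PROOFS =====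

-- recursive characterisation of A's loop state
def segSpec (d : List Int) : List Int → Int → List (Int × Int) × Int
  | [], start => ([], start)
  | i :: L, start =>
    if pyAt d i - pyAt d (i - 1) > 5 then
      let r := segSpec d L (pyAt d i)
      ((start, pyAt d (i - 1)) :: r.1, r.2)
    else segSpec d L start

theorem foldl_segSpec (d : List Int) :
    ∀ (L : List Int) (segs : List (Int × Int)) (start : Int),
      L.foldl
        (fun (st : List (Int × Int) × Int) i =>
          if pyAt d i - pyAt d (i - 1) > 5 then
            (st.1 ++ [(st.2, pyAt d (i - 1))], pyAt d i)
          else st)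
        (segs, start)
      = (segs ++ (segSpec d L start).1, (segSpec d L start).2) := by
  intro L
  induction L with
  | nil => intro segs start; simp [segSpec]
  | cons i L ih =>
    intro segs start
    by_cases h : pyAt d i - pyAt d (i - 1) > 5 <;>
      simp [segSpec, h, ih]

theorem zip_append_right {α β : Type} :
    ∀ (l₂ : List β) (l₁ : List α) (x : α), l₂.length ≤ l₁.length →
      (l₁ ++ [x]).zip l₂ = l₁.zip l₂ := by
  intro l₂
  induction l₂ with
  | nil => intro l₁ x _; simp
  | cons b t ih =>
    intro l₁ x h
    cases l₁ with
    | nil => simp at h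
    | cons a l₁ => simp at h ⊢; exact ih l₁ x h

theorem segSpec_zip (d : List Int) :
    ∀ (L : List Int) (a e : Int),
      (segSpec d L (pyAt d a)).1 ++ [((segSpec d L (pyAt d a)).2, pyAt d (e - 1))]
      = ((a :: L.filter (fun i => pyAt d i - pyAt d (i - 1) > 5)).zip
          (L.filter (fun i => pyAt d i - pyAt d (i - 1) > 5) ++ [e])).map
          (fun lohi => (pyAt d lohi.1, pyAt d (lohi.2 - 1))) := by
  intro L
  induction L with
  | nil => intro a e; simp [segSpec]
  | cons i L ih =>
    intro a e
    by_cases h : pyAt d i - pyAt d (i - 1) > 5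
    · simp only [segSpec, List.filter_cons, decide_eq_true_eq, h, if_pos,
        List.cons_append, List.zip_cons_cons, List.map_cons]
      exact congrArg _ (ih i e)
    · simp only [segSpec, List.filter_cons, decide_eq_true_eq, h,
        not_false_iff]
      exact ih a e

theorem pyAt_neg_one (d : List Int) (h : d ≠ []) :
    pyAt d (-1) = pyAt d ((d.length : Int) - 1) := by
  have hlen : 0 < d.length := List.length_pos_iff.mpr h
  unfold pyAt
  rw [PySem.List.pyGet?_neg_one]
  have : ((d.length : Int) - 1) = ((d.length - 1 : Nat) : Int) := by
    omega
  rw [this, PySem.List.pyGet?_natCast]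
  rw [List.getLast?_eq_getElem?]

-- ===== VERDICT (by name: the statement is the Claim_ definition above) =====
theorem find_separators_py_spec : Claim_equal_find_separators_py := by
  intro d _
  unfold Spec_find_separators_py find_separators_py find_separators_py_alt
  by_cases hd : d.length = 0
  · simp [hd]
  · simp only [hd, reduceIte]
    have hne : d ≠ [] := by
      intro h; subst h; exact hd rfl
    rw [foldl_segSpec d, List.nil_append, pyAt_neg_one d hne]
    rw [segSpec_zip d (PySem.List.pyRange 1 (d.length : Int) 1) 0 (d.length : Int)]
    set breaks := (PySem.List.pyRange 1 (d.length : Int) 1).filter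
      (fun i => pyAt d i - pyAt d (i - 1) > 5) with hb
    have htail : (0 :: (breaks ++ [(d.length : Int)])).tail = breaks ++ [(d.length : Int)] := rfl
    rw [htail]
    have hz : ((0 :: (breaks ++ [(d.length : Int)])).zip (breaks ++ [(d.length : Int)]))
        = ((0 :: breaks).zip (breaks ++ [(d.length : Int)])) := by
      have : (0 :: (breaks ++ [(d.length : Int)])) = (0 :: breaks) ++ [(d.length : Int)] := by
        simp
      rw [this]
      exact zip_append_right _ _ _ (by simp)
    rw [hz]
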